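-- pv_equiv track=rewrite | github.com/sitingren/Google-FooBar | zombit_infection.py | answer
-- ===== SOURCE A (Python) =====
-- def answer(population, x, y, strength):
--     # x = The X-Coordinate (column)
--     # y = The Y-Coordinate (row)
--     # population[row][column]
--     if population[y][x] != -1 and population[y][x] <= strength:
--         # Any infected cells value has been replaced with -1.
--         population[y][x] = -1
--
--         # Infect any uninfected neighbors
--         if x > 0:
--             population = answer(population, x - 1, y, strength)
--         if x < len(population[0]) - 1:
--             population = answer(population, x + 1, y, strength)
--         if y > 0:
--             population = answer(population, x, y - 1, strength)
--         if y < len(population) - 1: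
--             population = answer(population, x, y + 1, strength)
--
--     return population
-- ===== SOURCE B (Python) =====
-- def answer(population, x, y, strength):
--     # Iterative flood fill with an explicit stack instead of recursion.
--     # Mutates `population` in place (as the original does) and returns it.
--     stack = [(x, y)]
--     while stack:
--         cx, cy = stack.pop()
--         if population[cy][cx] != -1 and population[cy][cx] <= strength:
--             population[cy][cx] = -1
--             if cy < len(population) - 1:
--                 stack.append((cx, cy + 1))
--             if cy > 0:
--                 stack.append((cx, cy - 1))
--             if cx < len(population[0]) - 1:
--                 stack.append((cx + 1, cy))
--             if cx > 0:
--                 stack.append((cx - 1, cy))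
--     return population
-- ===== Notes on version B (the rewrite author's own statement) =====
-- stated objective: alternative
-- what changed: The recursive flood fill is replaced by an iterative worklist: an explicit stack of coordinates popped in a while-loop, re-checking the infection guard on each pop and pushing in-bounds neighbours, instead of four self-recursive calls per cell.
-- outside the precondition, e.g. on answer([[0], [0, 0]], 0, 0, 5): A returns [[-1], [-1, 0]], B returns [[-1], [-1, 0]]
import Mathlib
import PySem

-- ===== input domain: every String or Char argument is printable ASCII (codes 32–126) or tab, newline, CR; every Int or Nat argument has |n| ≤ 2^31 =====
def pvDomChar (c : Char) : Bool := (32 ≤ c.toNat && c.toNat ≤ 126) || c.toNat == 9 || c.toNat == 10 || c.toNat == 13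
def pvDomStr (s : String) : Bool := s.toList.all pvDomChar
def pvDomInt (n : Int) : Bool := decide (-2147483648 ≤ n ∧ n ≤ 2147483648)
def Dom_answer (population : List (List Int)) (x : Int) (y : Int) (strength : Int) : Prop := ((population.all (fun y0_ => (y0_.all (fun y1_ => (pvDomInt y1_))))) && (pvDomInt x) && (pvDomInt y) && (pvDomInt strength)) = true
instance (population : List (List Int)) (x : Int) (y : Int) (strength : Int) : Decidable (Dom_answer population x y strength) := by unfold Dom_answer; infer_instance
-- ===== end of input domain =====

-- B replaces A's recursion by an explicit-stack worklist loop (same guard, same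
-- in-place mutation of `population`, same returned object). The equivalence proved
-- here is about the RETURN value; both Pythons mutate the argument identically.

-- ===== PORT A =====

-- population[y][x] (two chained Python indexings; none = IndexError)
def pvGet2 (g : List (List Int)) (y x : Int) : Option Int :=
  (PySem.List.pyGet? g y).bind fun row => PySem.List.pyGet? row x

-- population[y][x] = v (used only after the guard validated both indices)
def pvSet2 (g : List (List Int)) (y x : Int) (v : Int) : List (List Int) :=
  PySem.List.pySetD g y (PySem.List.pySetD (PySem.List.pyGetD g y []) x v)

-- fuel bound shared by both ports: the total number of cells
def pvCells (g : List (List Int)) : Nat := (g.map List.length).sum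

-- A's recursion, step for step; fuel only makes it total (each recursive call is
-- made on a grid with strictly fewer not-yet-infected cells, so pvCells + 1 suffices).
def answerF (strength : Int) : Nat → List (List Int) → Int → Int → List (List Int)
  | 0, g, _, _ => g
  | f+1, g, x, y =>
    match pvGet2 g y x with
    | none => g   -- Python raises IndexError here (excluded by Pre_)
    | some v =>
      if v ≠ -1 ∧ v ≤ strength then
        let g0 := pvSet2 g y x (-1)
        let g1 := if 0 < x then answerF strength f g0 (x-1) y else g0
        let g2 := if x < ((PySem.List.pyGetD g1 0 []).length : Int) - 1 then answerF strength f g1 (x+1) y else g1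
        let g3 := if 0 < y then answerF strength f g2 x (y-1) else g2
        let g4 := if y < (g3.length : Int) - 1 then answerF strength f g3 x (y+1) else g3
        g4
      else g

def answer (population : List (List Int)) (x : Int) (y : Int) (strength : Int) : List (List Int) :=
  answerF strength (pvCells population + 1) population x y

-- ===== PORT B =====

-- B's while-loop over the explicit stack (the Python list's end = this list's head);
-- fuel only makes it total (each guarded pop infects a fresh cell and pushes ≤ 4).
def loopF (strength : Int) : Nat → List (Int × Int) → List (List Int) → List (List Int)
  | 0, _, g => g
  | _+1, [], g => g
  | f+1, (cx, cy) :: rest, g =>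
    match pvGet2 g cy cx with
    | none => g   -- Python raises IndexError here (excluded by Pre_)
    | some v =>
      if v ≠ -1 ∧ v ≤ strength then
        let g' := pvSet2 g cy cx (-1)
        let s1 := if cy < (g'.length : Int) - 1 then (cx, cy+1) :: rest else rest
        let s2 := if 0 < cy then (cx, cy-1) :: s1 else s1
        let s3 := if cx < ((PySem.List.pyGetD g' 0 []).length : Int) - 1 then (cx+1, cy) :: s2 else s2
        let s4 := if 0 < cx then (cx-1, cy) :: s3 else s3
        loopF strength f s4 g'
      else loopF strength f rest g

def answer_alt (population : List (List Int)) (x : Int) (y : Int) (strength : Int) : List (List Int) :=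
  loopF strength (4 * pvCells population + 2) [(x, y)] population

-- ===== PRECONDITION & SPEC =====
-- Pre_ excludes (a) inputs on which A raises IndexError at the start coordinate and
-- (b) non-rectangular grids whose start cell passes the infection guard: there the
-- flood's reach decides whether A raises IndexError, which is not a closed-form
-- condition, so such grids are excluded conservatively (on some of them A returns;
-- see the cite in the claim). Grids whose start cell fails the guard are admitted
-- whatever their shape.
def Pre_answer (population : List (List Int)) (x : Int) (y : Int) (strength : Int) : Prop :=
  PySem.Raise.InRange population.length y ∧
  PySem.Raise.InRange (PySem.List.pyGetD population y []).length x ∧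
  ((PySem.List.pyGetD (PySem.List.pyGetD population y []) x 0 = -1 ∨
    strength < PySem.List.pyGetD (PySem.List.pyGetD population y []) x 0) ∨
   ∀ r ∈ population, r.length = (population.headD []).length)
instance (population : List (List Int)) (x : Int) (y : Int) (strength : Int) : Decidable (Pre_answer population x y strength) := by unfold Pre_answer; infer_instance

def pvWitness_answer : List (List Int) × Int × Int × Int := ([[0, 2], [5, 1]], 0, 0, 3)

def Spec_answer (population : List (List Int)) (x : Int) (y : Int) (strength : Int) (out : List (List Int)) : Prop := out = answer_alt population x y strength
instance (population : List (List Int)) (x : Int) (y : Int) (strength : Int) (out : List (List Int)) : Decidable (Spec_answer population x y strength out) := by unfold Spec_answer; infer_instance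

-- ===== CLAIM (what is proved, stated in full; the proofs are below) =====
def Claim_equal_answer : Prop := ∀ (population : List (List Int)) (x : Int) (y : Int) (strength : Int), Dom_answer population x y strength → Pre_answer population x y strength → Spec_answer population x y strength (answer population x y strength)

-- ===== LEMMAS AND PROOFS =====

-- number of not-yet-infected cells: the decreasing measure of both programs
def pvCnt (g : List (List Int)) : Nat := (g.map (fun r => r.countP (fun v => v != -1))).sum

-- the grid is rectangular of width n (and nonempty)
def pvRect (g : List (List Int)) (n : Nat) : Prop := g ≠ [] ∧ ∀ r ∈ g, r.length = n

-- a coordinate Python can index in an m-row grid of width n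
def pvValid (n m : Nat) (c : Int × Int) : Prop :=
  PySem.Raise.InRange n c.1 ∧ PySem.Raise.InRange m c.2

-- canonical (fuel-saturated) forms of the two programs
def pvDfs (strength : Int) (g : List (List Int)) (x y : Int) : List (List Int) :=
  answerF strength (pvCnt g + 1) g x y
def pvLoop (strength : Int) (s : List (Int × Int)) (g : List (List Int)) : List (List Int) :=
  loopF strength (s.length + 4 * pvCnt g + 1) s g

-- the guarded branch of A's recursion, as one named term
def pvChainA (st : Int) (f : Nat) (g : List (List Int)) (x y : Int) : List (List Int) :=
  let g0 := pvSet2 g y x (-1)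
  let g1 := if 0 < x then answerF st f g0 (x-1) y else g0
  let g2 := if x < ((PySem.List.pyGetD g1 0 []).length : Int) - 1 then answerF st f g1 (x+1) y else g1
  let g3 := if 0 < y then answerF st f g2 x (y-1) else g2
  if y < (g3.length : Int) - 1 then answerF st f g3 x (y+1) else g3

-- the stack pushed by the guarded branch of B's loop, as one named term
def pvStackB (h : List (List Int)) (x y : Int) (s : List (Int × Int)) : List (Int × Int) :=
  let s1 := if y < (h.length : Int) - 1 then (x, y+1) :: s else s
  let s2 := if 0 < y then (x, y-1) :: s1 else s1
  let s3 := if x < ((PySem.List.pyGetD h 0 []).length : Int) - 1 then (x+1, y) :: s2 else s2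
  if 0 < x then (x-1, y) :: s3 else s3

-- ---- step lemmas: one unfolding of each port ----

theorem answerF_none (st : Int) (f : Nat) (g : List (List Int)) (x y : Int)
    (h : pvGet2 g y x = none) : answerF st (f+1) g x y = g := by
  simp only [answerF, h]

theorem answerF_nofire (st : Int) (f : Nat) (g : List (List Int)) (x y : Int) (v : Int)
    (h : pvGet2 g y x = some v) (hg : ¬(v ≠ -1 ∧ v ≤ st)) : answerF st (f+1) g x y = g := by
  simp only [answerF, h]
  rw [if_neg hg]

theorem answerF_fire (st : Int) (f : Nat) (g : List (List Int)) (x y : Int) (v : Int)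
    (h : pvGet2 g y x = some v) (hg : v ≠ -1 ∧ v ≤ st) :
    answerF st (f+1) g x y = pvChainA st f g x y := by
  simp only [answerF, pvChainA, h]
  rw [if_pos hg]

theorem loopF_nil (st : Int) (f : Nat) (g : List (List Int)) : loopF st f [] g = g := by
  cases f <;> rfl

theorem loopF_none (st : Int) (f : Nat) (g : List (List Int)) (x y : Int) (s : List (Int × Int))
    (h : pvGet2 g y x = none) : loopF st (f+1) ((x, y) :: s) g = g := by
  simp only [loopF, h]

theorem loopF_nofire (st : Int) (f : Nat) (g : List (List Int)) (x y : Int) (s : List (Int × Int)) (v : Int)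
    (h : pvGet2 g y x = some v) (hg : ¬(v ≠ -1 ∧ v ≤ st)) :
    loopF st (f+1) ((x, y) :: s) g = loopF st f s g := by
  simp only [loopF, h]
  rw [if_neg hg]

theorem loopF_fire (st : Int) (f : Nat) (g : List (List Int)) (x y : Int) (s : List (Int × Int)) (v : Int)
    (h : pvGet2 g y x = some v) (hg : v ≠ -1 ∧ v ≤ st) :
    loopF st (f+1) ((x, y) :: s) g
      = loopF st f (pvStackB (pvSet2 g y x (-1)) x y s) (pvSet2 g y x (-1)) := by
  simp only [loopF, pvStackB, h]
  rw [if_pos hg]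

-- ---- basic facts about the primitives ----

-- index resolution of a successful Python indexing
theorem pvAt {α : Type} (l : List α) (i : Int) (a : α) (h : PySem.List.pyGet? l i = some a) :
    ∃ j : Nat, j < l.length ∧ l[j]? = some a ∧
      (∀ v, PySem.List.pySetD l i v = l.set j v) ∧ (∀ d, PySem.List.pyGetD l i d = a) := by
  unfold PySem.List.pyGet? at h
  cases hj : PySem.List.pyIdx? l.length i with
  | none => rw [hj] at h; simp at h
  | some j =>
    rw [hj] at h; simp at h
    refine ⟨j, ?_, h, ?_, ?_⟩
    · exact (List.getElem?_eq_some_iff.mp h).1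
    · intro v
      unfold PySem.List.pySetD PySem.List.pySet?
      rw [hj]; rfl
    · intro d
      unfold PySem.List.pyGetD PySem.List.pyGet?
      rw [hj]; simp [h]

theorem pvSum_set_sub (L : List Nat) (j : Nat) (a : Nat) (h : j < L.length) :
    (L.set j a).sum + L[j] = L.sum + a := by
  have h1 := List.sum_set L j a
  have h2 := List.sum_set L j L[j]
  rw [List.set_getElem_self] at h2
  rw [h1, h2]
  simp [h]; omega

-- a successful Python indexing: the total pyGetD agrees with it
theorem pvGetD_some {α : Type} (l : List α) (i : Int) (d : α)
    (h : PySem.Raise.InRange l.length i) :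
    PySem.List.pyGet? l i = some (PySem.List.pyGetD l i d) := by
  cases hg : PySem.List.pyGet? l i with
  | none => exact absurd ((PySem.List.pyGet?_eq_none_iff _ _).mp hg) (not_not.mpr h)
  | some a => unfold PySem.List.pyGetD; rw [hg]; rfl

-- setting a ≠ -1 cell to -1 decrements the count
theorem pvCnt_set2 (g : List (List Int)) (y x : Int) (v : Int)
    (hg : pvGet2 g y x = some v) (hv : v ≠ -1) :
    pvCnt (pvSet2 g y x (-1)) + 1 = pvCnt g := by
  unfold pvGet2 at hg
  cases hrow : PySem.List.pyGet? g y with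
  | none => rw [hrow] at hg; simp at hg
  | some row =>
    rw [hrow] at hg; simp at hg
    obtain ⟨jy, hjy, hgjy, hsetg, hgetg⟩ := pvAt g y row hrow
    obtain ⟨jx, hjx, hrjx, hsetr, _⟩ := pvAt row x v hg
    obtain ⟨_, hrv⟩ := List.getElem?_eq_some_iff.mp hrjx
    obtain ⟨_, hgr⟩ := List.getElem?_eq_some_iff.mp hgjy
    unfold pvSet2 pvCnt
    rw [hgetg, hsetr, hsetg, List.map_set]
    have hpos : 0 < row.countP (fun v => v != -1) :=
      List.countP_pos_iff.mpr ⟨v, PySem.List.mem_of_pyGet?_eq_some _ hg, by simp [hv]⟩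
    have hrow' : (row.set jx (-1)).countP (fun v => v != -1) + 1 = row.countP (fun v => v != -1) := by
      rw [List.countP_set hjx]
      simp [hrv, hv]
      omega
    have hjy' : jy < (g.map (fun r => r.countP (fun v => v != -1))).length := by simpa using hjy
    have hs := pvSum_set_sub (g.map (fun r => r.countP (fun v => v != -1))) jy
      ((row.set jx (-1)).countP (fun v => v != -1)) hjy'
    have hgj : (g.map (fun r => r.countP (fun v => v != -1)))[jy]'hjy' = row.countP (fun v => v != -1) := by
      simp [hgr]
    rw [hgj] at hs
    omega

-- shape preservation of a two-level Python set
theorem pvShape_set2 (g : List (List Int)) (y x : Int) (v w : Int)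
    (hg : pvGet2 g y x = some v) :
    (pvSet2 g y x w).map List.length = g.map List.length := by
  unfold pvGet2 at hg
  cases hrow : PySem.List.pyGet? g y with
  | none => rw [hrow] at hg; simp at hg
  | some row =>
    rw [hrow] at hg; simp at hg
    obtain ⟨jy, hjy, hgjy, hsetg, hgetg⟩ := pvAt g y row hrow
    obtain ⟨jx, hjx, hrjx, hsetr, _⟩ := pvAt row x v hg
    obtain ⟨_, hgr⟩ := List.getElem?_eq_some_iff.mp hgjy
    unfold pvSet2
    rw [hgetg, hsetr w, hsetg, List.map_set]
    have hlen : (row.set jx w).length = row.length := by simp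
    rw [hlen]
    have hjy' : jy < (g.map List.length).length := by simpa using hjy
    have : row.length = (g.map List.length)[jy]'hjy' := by simp [hgr]
    rw [this, List.set_getElem_self]

-- a guarded cell witnesses a positive count
theorem pvCnt_pos (g : List (List Int)) (y x : Int) (v : Int)
    (hg : pvGet2 g y x = some v) (hv : v ≠ -1) : 1 ≤ pvCnt g := by
  unfold pvGet2 at hg
  cases hrow : PySem.List.pyGet? g y with
  | none => rw [hrow] at hg; simp at hg
  | some row =>
    rw [hrow] at hg; simp at hg
    have hrmem : row ∈ g := PySem.List.mem_of_pyGet?_eq_some _ hrow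
    have h1 : 0 < row.countP (fun v => v != -1) :=
      List.countP_pos_iff.mpr ⟨v, PySem.List.mem_of_pyGet?_eq_some _ hg, by simp [hv]⟩
    unfold pvCnt
    calc 1 ≤ row.countP (fun v => v != -1) := h1
    _ ≤ (g.map (fun r => r.countP (fun v => v != -1))).sum :=
      List.single_le_sum (by simp) _ (List.mem_map_of_mem hrmem)

theorem pvCnt_le_cells (g : List (List Int)) : pvCnt g ≤ pvCells g := by
  unfold pvCnt pvCells
  apply List.sum_le_sum
  intro r _
  exact List.countP_le_length

-- rectangularity and length transfer along shape equality
theorem pvRect_of_shape (g g' : List (List Int)) (n : Nat) (h : pvRect g n)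
    (hs : g'.map List.length = g.map List.length) : pvRect g' n := by
  obtain ⟨hne, hall⟩ := h
  constructor
  · intro he
    rw [he] at hs
    exact hne (List.map_eq_nil_iff.mp hs.symm)
  · intro r hr
    have : r.length ∈ g'.map List.length := List.mem_map_of_mem hr
    rw [hs] at this
    obtain ⟨r0, hr0, he⟩ := List.mem_map.mp this
    rw [← he]
    exact hall r0 hr0

theorem pvLen_of_shape (g g' : List (List Int))
    (hs : g'.map List.length = g.map List.length) : g'.length = g.length := by
  have := congrArg List.length hs
  simpa using this

-- the width of a nonempty rectangular grid, as read by the ports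
theorem pvWidth (g : List (List Int)) (n : Nat) (h : pvRect g n) :
    (PySem.List.pyGetD g 0 []).length = n := by
  obtain ⟨hne, hall⟩ := h
  cases g with
  | nil => exact absurd rfl hne
  | cons r t =>
    rw [PySem.List.pyGetD_zero_cons]
    exact hall r (by simp)

-- a valid coordinate of a rectangular grid can be read
theorem pvGet2_isSome (g : List (List Int)) (n : Nat) (h : pvRect g n) (x y : Int)
    (hc : pvValid n g.length (x, y)) : ∃ v, pvGet2 g y x = some v := by
  obtain ⟨hx, hy⟩ := hc
  cases hrow : PySem.List.pyGet? g y with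
  | none => exact absurd ((PySem.List.pyGet?_eq_none_iff _ _).mp hrow) (not_not.mpr hy)
  | some row =>
    have hrl : row.length = n := h.2 row (PySem.List.mem_of_pyGet?_eq_some _ hrow)
    cases hv : PySem.List.pyGet? row x with
    | none =>
      have : ¬ PySem.Raise.InRange row.length x := (PySem.List.pyGet?_eq_none_iff _ _).mp hv
      rw [hrl] at this
      exact absurd hx this
    | some v =>
      exact ⟨v, by unfold pvGet2; rw [hrow]; simpa using hv⟩

-- ---- shape, monotonicity and fuel-irrelevance of A's recursion ----

theorem pvDfsShape (st : Int) (f : Nat) : ∀ (g : List (List Int)) (x y : Int),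
    (answerF st f g x y).map List.length = g.map List.length := by
  induction f with
  | zero => intro g x y; simp [answerF]
  | succ f IH =>
    intro g x y
    cases hv : pvGet2 g y x with
    | none => rw [answerF_none st f g x y hv]
    | some v =>
      by_cases hg : v ≠ -1 ∧ v ≤ st
      · rw [answerF_fire st f g x y v hv hg]
        simp only [pvChainA]
        have step : ∀ (c : Prop) (inst : Decidable c) (h : List (List Int)) (a b : Int),
            (if c then answerF st f h a b else h).map List.length = h.map List.length := by
          intro c inst h a b
          split
          · exact IH h a b
          · rfl
        exact (step _ _ _ _ _).trans ((step _ _ _ _ _).trans ((step _ _ _ _ _).trans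
          ((step _ _ _ _ _).trans (pvShape_set2 g y x v (-1) hv))))
      · rw [answerF_nofire st f g x y v hv hg]

theorem pvDfsMono (st : Int) (f : Nat) : ∀ (g : List (List Int)) (x y : Int),
    pvCnt (answerF st f g x y) ≤ pvCnt g := by
  induction f with
  | zero => intro g x y; simp [answerF]
  | succ f IH =>
    intro g x y
    cases hv : pvGet2 g y x with
    | none => rw [answerF_none st f g x y hv]
    | some v =>
      by_cases hg : v ≠ -1 ∧ v ≤ st
      · rw [answerF_fire st f g x y v hv hg]
        simp only [pvChainA]
        have step : ∀ (c : Prop) (inst : Decidable c) (h : List (List Int)) (a b : Int),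
            pvCnt (if c then answerF st f h a b else h) ≤ pvCnt h := by
          intro c inst h a b
          split
          · exact IH h a b
          · exact le_refl _
        have hbase : pvCnt (pvSet2 g y x (-1)) ≤ pvCnt g := by
          have := pvCnt_set2 g y x v hv hg.1; omega
        exact le_trans (step _ _ _ _ _) (le_trans (step _ _ _ _ _)
          (le_trans (step _ _ _ _ _) (le_trans (step _ _ _ _ _) hbase)))
      · rw [answerF_nofire st f g x y v hv hg]

theorem pvDfsIrrel (st : Int) : ∀ (k : Nat) (g : List (List Int)), pvCnt g ≤ k →
    ∀ (f₁ f₂ : Nat), pvCnt g < f₁ → pvCnt g < f₂ → ∀ (x y : Int),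
    answerF st f₁ g x y = answerF st f₂ g x y := by
  intro k
  induction k with
  | zero =>
    intro g hc f₁ f₂ h1 h2 x y
    cases f₁ with
    | zero => omega
    | succ a =>
      cases f₂ with
      | zero => omega
      | succ b =>
        cases hv : pvGet2 g y x with
        | none => rw [answerF_none st a g x y hv, answerF_none st b g x y hv]
        | some v =>
          by_cases hg : v ≠ -1 ∧ v ≤ st
          · have := pvCnt_pos g y x v hv hg.1; omega
          · rw [answerF_nofire st a g x y v hv hg, answerF_nofire st b g x y v hv hg]
  | succ k IH =>
    intro g hc f₁ f₂ h1 h2 x y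
    cases f₁ with
    | zero => omega
    | succ a =>
      cases f₂ with
      | zero => omega
      | succ b =>
        cases hv : pvGet2 g y x with
        | none => rw [answerF_none st a g x y hv, answerF_none st b g x y hv]
        | some v =>
          by_cases hg : v ≠ -1 ∧ v ≤ st
          · rw [answerF_fire st a g x y v hv hg, answerF_fire st b g x y v hv hg]
            simp only [pvChainA]
            have hc1 := pvCnt_set2 g y x v hv hg.1
            have estep : ∀ (c : Prop) (inst : Decidable c) (h : List (List Int)) (a' b' : Int),
                pvCnt h + 1 ≤ pvCnt g →
                (if c then answerF st a h a' b' else h) = (if c then answerF st b h a' b' else h) := by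
              intro c inst h a' b' hh
              split
              · exact IH h (by omega) a b (by omega) (by omega) a' b'
              · rfl
            have monoIf : ∀ (c : Prop) (inst : Decidable c) (h : List (List Int)) (a' b' : Int),
                pvCnt (if c then answerF st b h a' b' else h) ≤ pvCnt h := by
              intro c inst h a' b'
              split
              · exact pvDfsMono st b h a' b'
              · exact le_refl _
            rw [estep _ _ (pvSet2 g y x (-1)) (x-1) y (by omega)]
            set G1 := (if 0 < x then answerF st b (pvSet2 g y x (-1)) (x-1) y else pvSet2 g y x (-1)) with hG1
            have hcntG1 : pvCnt G1 ≤ pvCnt (pvSet2 g y x (-1)) := by rw [hG1]; exact monoIf _ _ _ _ _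
            rw [estep _ _ G1 (x+1) y (by omega)]
            set G2 := (if x < ((PySem.List.pyGetD G1 0 []).length : Int) - 1 then answerF st b G1 (x+1) y else G1) with hG2
            have hcntG2 : pvCnt G2 ≤ pvCnt G1 := by rw [hG2]; exact monoIf _ _ _ _ _
            rw [estep _ _ G2 x (y-1) (by omega)]
            set G3 := (if 0 < y then answerF st b G2 x (y-1) else G2) with hG3
            have hcntG3 : pvCnt G3 ≤ pvCnt G2 := by rw [hG3]; exact monoIf _ _ _ _ _
            rw [estep _ _ G3 x (y+1) (by omega)]
          · rw [answerF_nofire st a g x y v hv hg, answerF_nofire st b g x y v hv hg]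

-- ---- bounds and fuel-irrelevance of B's loop ----

theorem pvStackB_len (h : List (List Int)) (x y : Int) (s : List (Int × Int)) :
    (pvStackB h x y s).length ≤ s.length + 4 := by
  simp only [pvStackB]
  repeat' split
  all_goals simp

theorem pvLoopIrrel (st : Int) : ∀ (k : Nat) (s : List (Int × Int)) (g : List (List Int))
    (f₁ f₂ : Nat), s.length + 4 * pvCnt g ≤ k →
    s.length + 4 * pvCnt g < f₁ → s.length + 4 * pvCnt g < f₂ →
    loopF st f₁ s g = loopF st f₂ s g := by
  intro k
  induction k with
  | zero =>
    intro s g f₁ f₂ hk h1 h2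
    cases s with
    | nil => rw [loopF_nil, loopF_nil]
    | cons c rest => simp at hk
  | succ k IH =>
    intro s g f₁ f₂ hk h1 h2
    cases s with
    | nil => rw [loopF_nil, loopF_nil]
    | cons c rest =>
      obtain ⟨cx, cy⟩ := c
      cases f₁ with
      | zero => omega
      | succ a =>
        cases f₂ with
        | zero => omega
        | succ b =>
          cases hv : pvGet2 g cy cx with
          | none => rw [loopF_none st a g cx cy rest hv, loopF_none st b g cx cy rest hv]
          | some v =>
            by_cases hg : v ≠ -1 ∧ v ≤ st
            · rw [loopF_fire st a g cx cy rest v hv hg, loopF_fire st b g cx cy rest v hv hg]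
              have hc1 := pvCnt_set2 g cy cx v hv hg.1
              have hsl := pvStackB_len (pvSet2 g cy cx (-1)) cx cy rest
              apply IH
              · simp at hk ⊢; omega
              · simp at h1 ⊢; omega
              · simp at h2 ⊢; omega
            · rw [loopF_nofire st a g cx cy rest v hv hg, loopF_nofire st b g cx cy rest v hv hg]
              apply IH
              · simp at hk ⊢; omega
              · simp at h1 ⊢; omega
              · simp at h2 ⊢; omega

-- ---- the simulation: one stack pop mirrors one recursive call ----

theorem pvSim (st : Int) : ∀ (k : Nat) (g : List (List Int)), pvCnt g ≤ k →
    ∀ (n : Nat), pvRect g n → ∀ (x y : Int) (s : List (Int × Int)),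
    pvValid n g.length (x, y) → (∀ c ∈ s, pvValid n g.length c) →
    pvLoop st ((x, y) :: s) g = pvLoop st s (pvDfs st g x y) := by
  intro k
  induction k with
  | zero =>
    intro g hc n hrect x y s hxy hs
    obtain ⟨v, hv⟩ := pvGet2_isSome g n hrect x y hxy
    by_cases hg : v ≠ -1 ∧ v ≤ st
    · have := pvCnt_pos g y x v hv hg.1
      omega
    · unfold pvLoop pvDfs
      rw [loopF_nofire st (((x, y) :: s).length + 4 * pvCnt g) g x y s v hv hg,
        answerF_nofire st (pvCnt g) g x y v hv hg]
      exact pvLoopIrrel st (s.length + 4 * pvCnt g) s g _ _ le_rfl (by simp) (by omega)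
  | succ k IH =>
    intro g hc n hrect x y s hxy hs
    obtain ⟨v, hv⟩ := pvGet2_isSome g n hrect x y hxy
    by_cases hg : v ≠ -1 ∧ v ≤ st
    case neg =>
      unfold pvLoop pvDfs
      rw [loopF_nofire st (((x, y) :: s).length + 4 * pvCnt g) g x y s v hv hg,
        answerF_nofire st (pvCnt g) g x y v hv hg]
      exact pvLoopIrrel st (s.length + 4 * pvCnt g) s g _ _ le_rfl (by simp) (by omega)
    case pos =>
      -- facts about the freshly infected grid
      have hc1 : pvCnt (pvSet2 g y x (-1)) + 1 = pvCnt g := pvCnt_set2 g y x v hv hg.1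
      have hshP : (pvSet2 g y x (-1)).map List.length = g.map List.length :=
        pvShape_set2 g y x v (-1) hv
      have hrectP : pvRect (pvSet2 g y x (-1)) n := pvRect_of_shape g _ n hrect hshP
      have hlenP : (pvSet2 g y x (-1)).length = g.length := pvLen_of_shape g _ hshP
      -- generic helpers for one conditional recursive call
      have rectIf : ∀ (c : Prop) (inst : Decidable c) (h : List (List Int)) (a b : Int),
          pvRect h n → pvRect (if c then pvDfs st h a b else h) n := by
        intro c inst h a b hh
        split
        · exact pvRect_of_shape h _ n hh (pvDfsShape st _ h a b)
        · exact hh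
      have lenIf : ∀ (c : Prop) (inst : Decidable c) (h : List (List Int)) (a b : Int),
          (if c then pvDfs st h a b else h).length = h.length := by
        intro c inst h a b
        split
        · exact pvLen_of_shape h _ (pvDfsShape st _ h a b)
        · rfl
      have cntIf : ∀ (c : Prop) (inst : Decidable c) (h : List (List Int)) (a b : Int),
          pvCnt (if c then pvDfs st h a b else h) ≤ pvCnt h := by
        intro c inst h a b
        split
        · exact pvDfsMono st _ h a b
        · exact le_refl _
      -- one conditional push mirrors one conditional recursive call (uses IH)
      have push : ∀ (c : Prop) (inst : Decidable c) (h : List (List Int)) (cx cy : Int)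
          (t : List (Int × Int)), pvCnt h ≤ k → pvRect h n → h.length = g.length →
          (c → pvValid n g.length (cx, cy)) → (∀ a ∈ t, pvValid n g.length a) →
          pvLoop st (if c then (cx, cy) :: t else t) h
            = pvLoop st t (if c then pvDfs st h cx cy else h) := by
        intro c inst h cx cy t hcnt hre hlen hcell ht
        by_cases hc' : c
        · rw [if_pos hc', if_pos hc']
          exact IH h hcnt n hre cx cy t (by rw [hlen]; exact hcell hc')
            (by intro a ha; rw [hlen]; exact ht a ha)
        · rw [if_neg hc', if_neg hc']
      -- validity of the four neighbours under their push conditions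
      have hvL : (0 < x) → pvValid n g.length (x-1, y) := by
        intro h; simp [pvValid, PySem.Raise.InRange] at hxy ⊢; omega
      have hvR : (x < (n : Int) - 1) → pvValid n g.length (x+1, y) := by
        intro h; simp [pvValid, PySem.Raise.InRange] at hxy ⊢; omega
      have hvU : (0 < y) → pvValid n g.length (x, y-1) := by
        intro h; simp [pvValid, PySem.Raise.InRange] at hxy ⊢; omega
      have hvD : (y < (g.length : Int) - 1) → pvValid n g.length (x, y+1) := by
        intro h; simp [pvValid, PySem.Raise.InRange] at hxy ⊢; omega
      have valstep : ∀ (c : Prop) (inst : Decidable c) (cell : Int × Int)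
          (t : List (Int × Int)), (c → pvValid n g.length cell) →
          (∀ a ∈ t, pvValid n g.length a) →
          ∀ a ∈ (if c then cell :: t else t), pvValid n g.length a := by
        intro c inst cell t hcell ht a ha
        by_cases hc' : c
        · rw [if_pos hc'] at ha
          rcases List.mem_cons.mp ha with h | h
          · exact h ▸ hcell hc'
          · exact ht a h
        · rw [if_neg hc'] at ha
          exact ht a ha
      -- LHS: one loop step, folded back to canonical fuel
      unfold pvLoop
      rw [loopF_fire st (((x, y) :: s).length + 4 * pvCnt g) g x y s v hv hg]
      have hsl := pvStackB_len (pvSet2 g y x (-1)) x y s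
      have hfold : loopF st (((x, y) :: s).length + 4 * pvCnt g)
            (pvStackB (pvSet2 g y x (-1)) x y s) (pvSet2 g y x (-1))
          = pvLoop st (pvStackB (pvSet2 g y x (-1)) x y s) (pvSet2 g y x (-1)) := by
        unfold pvLoop
        exact pvLoopIrrel st ((pvStackB (pvSet2 g y x (-1)) x y s).length
            + 4 * pvCnt (pvSet2 g y x (-1))) _ _ _ _ le_rfl (by simp; omega) (by omega)
      rw [hfold]
      simp only [pvStackB]
      rw [hlenP, pvWidth (pvSet2 g y x (-1)) n hrectP]
      -- RHS: one recursion step, inner calls folded to canonical fuel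
      unfold pvDfs
      rw [answerF_fire st (pvCnt g) g x y v hv hg]
      simp only [pvChainA]
      rw [show answerF st (pvCnt g) (pvSet2 g y x (-1)) (x-1) y
          = pvDfs st (pvSet2 g y x (-1)) (x-1) y from
        pvDfsIrrel st (pvCnt (pvSet2 g y x (-1))) _ le_rfl _ _ (by omega) (by omega) (x-1) y]
      set G1 := (if 0 < x then pvDfs st (pvSet2 g y x (-1)) (x-1) y else pvSet2 g y x (-1)) with hG1
      have hrect1 : pvRect G1 n := by rw [hG1]; exact rectIf _ _ _ _ _ hrectP
      have hlen1 : G1.length = g.length := by rw [hG1, lenIf _ _ _ _ _, hlenP]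
      have hcnt1 : pvCnt G1 ≤ pvCnt (pvSet2 g y x (-1)) := by rw [hG1]; exact cntIf _ _ _ _ _
      rw [pvWidth G1 n hrect1]
      rw [show answerF st (pvCnt g) G1 (x+1) y = pvDfs st G1 (x+1) y from
        pvDfsIrrel st (pvCnt G1) G1 le_rfl _ _ (by omega) (by omega) (x+1) y]
      set G2 := (if x < (n : Int) - 1 then pvDfs st G1 (x+1) y else G1) with hG2
      have hrect2 : pvRect G2 n := by rw [hG2]; exact rectIf _ _ _ _ _ hrect1
      have hlen2 : G2.length = g.length := by rw [hG2, lenIf _ _ _ _ _, hlen1]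
      have hcnt2 : pvCnt G2 ≤ pvCnt G1 := by rw [hG2]; exact cntIf _ _ _ _ _
      rw [show answerF st (pvCnt g) G2 x (y-1) = pvDfs st G2 x (y-1) from
        pvDfsIrrel st (pvCnt G2) G2 le_rfl _ _ (by omega) (by omega) x (y-1)]
      set G3 := (if 0 < y then pvDfs st G2 x (y-1) else G2) with hG3
      have hrect3 : pvRect G3 n := by rw [hG3]; exact rectIf _ _ _ _ _ hrect2
      have hlen3 : G3.length = g.length := by rw [hG3, lenIf _ _ _ _ _, hlen2]
      have hcnt3 : pvCnt G3 ≤ pvCnt G2 := by rw [hG3]; exact cntIf _ _ _ _ _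
      rw [hlen3]
      rw [show answerF st (pvCnt g) G3 x (y+1) = pvDfs st G3 x (y+1) from
        pvDfsIrrel st (pvCnt G3) G3 le_rfl _ _ (by omega) (by omega) x (y+1)]
      -- chain the four pushes
      have v1 := valstep (y < (g.length : Int) - 1) inferInstance (x, y+1) s hvD hs
      have v2 := valstep (0 < y) inferInstance (x, y-1) _ hvU v1
      have v3 := valstep (x < (n : Int) - 1) inferInstance (x+1, y) _ hvR v2
      rw [push (0 < x) inferInstance (pvSet2 g y x (-1)) (x-1) y _ (by omega) hrectP hlenP hvL v3]
      rw [← hG1]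
      rw [push (x < (n : Int) - 1) inferInstance G1 (x+1) y _ (by omega) hrect1 hlen1 hvR v2]
      rw [← hG2]
      rw [push (0 < y) inferInstance G2 x (y-1) _ (by omega) hrect2 hlen2 hvU v1]
      rw [← hG3]
      rw [push (y < (g.length : Int) - 1) inferInstance G3 x (y+1) _ (by omega) hrect3 hlen3 hvD hs]
      rfl

-- ===== VERDICT (by name: the statement is the Claim_ definition above) =====
theorem answer_spec : Claim_equal_answer := by
  intro population x y strength hdom hpre
  unfold Spec_answer
  obtain ⟨hy, hx, hcase⟩ := hpre
  have hrow : PySem.List.pyGet? population y = some (PySem.List.pyGetD population y []) :=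
    pvGetD_some population y [] hy
  have hcell : PySem.List.pyGet? (PySem.List.pyGetD population y []) x
      = some (PySem.List.pyGetD (PySem.List.pyGetD population y []) x 0) :=
    pvGetD_some _ x 0 hx
  have hv : pvGet2 population y x
      = some (PySem.List.pyGetD (PySem.List.pyGetD population y []) x 0) := by
    unfold pvGet2
    rw [hrow]
    simpa using hcell
  have hcnt := pvCnt_le_cells population
  have hA : answer population x y strength = pvDfs strength population x y := by
    unfold answer pvDfs
    exact pvDfsIrrel strength (pvCnt population) population le_rfl _ _ (by omega) (by omega) x y
  have hB : answer_alt population x y strength = pvLoop strength [(x, y)] population := by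
    unfold answer_alt pvLoop
    exact pvLoopIrrel strength ([(x, y)].length + 4 * pvCnt population) [(x, y)] population _ _
      le_rfl (by simp; omega) (by omega)
  rw [hA, hB]
  by_cases hrect : ∀ r ∈ population, r.length = (population.headD []).length
  · -- rectangular grid: run the simulation with the empty remaining stack
    have hne : population ≠ [] := by
      intro he
      rw [he] at hy
      simp [PySem.Raise.InRange] at hy
      omega
    have hrect' : pvRect population ((population.headD []).length) := ⟨hne, hrect⟩
    have hxv : pvValid ((population.headD []).length) population.length (x, y) := by
      constructor
      · have hmem : PySem.List.pyGetD population y [] ∈ population := PySem.List.pyGetD_mem population [] hy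
        have hl := hrect _ hmem
        rw [← hl]
        exact hx
      · exact hy
    rw [pvSim strength (pvCnt population) population le_rfl _ hrect' x y [] hxv (by simp)]
    unfold pvLoop
    exact (loopF_nil _ _ _).symm
  · -- the start cell fails the guard: both programs return the grid unchanged
    have hgf := hcase.resolve_right hrect
    have hng : ¬(PySem.List.pyGetD (PySem.List.pyGetD population y []) x 0 ≠ -1 ∧
        PySem.List.pyGetD (PySem.List.pyGetD population y []) x 0 ≤ strength) := by
      rcases hgf with h | h
      · intro hcon; exact hcon.1 h
      · intro hcon; exact absurd hcon.2 (not_le.mpr h)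
    unfold pvDfs
    rw [answerF_nofire strength (pvCnt population) population x y _ hv hng]
    unfold pvLoop
    rw [loopF_nofire strength ([(x, y)].length + 4 * pvCnt population) population x y [] _ hv hng,
      loopF_nil]
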